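-- pv_equiv track=rewrite | github.com/umair-nasir14/Game-Traversal-Benchmark | gtb/replicate.py | calculate_path_length
-- ===== SOURCE A (Python) =====
-- def calculate_path_length(actions):
--     # Initialize the agent's starting position
--     x, y = 0, 0
--
--     # Dictionary to map actions to their coordinate changes
--     move_delta = {
--         'move_up': (0, 1),
--         'move_down': (0, -1),
--         'move_left': (-1, 0),
--         'move_right': (1, 0)
--     }
--
--     # Keep track of each position the agent moves to
--     path_positions = [(x, y)]  # Start with the initial position
--     path = []
--     # Process each action
--     for action in actions:
--         if action in move_delta:
--             dx, dy = move_delta[action]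
--             x += dx
--             y += dy
--             path_positions.append((x, y))  # Append new position after the move
--             path.append({"x":dx,"y":dy})
--     # Calculate the path length by summing the distances between consecutive positions
--     path_length = 0
--     for i in range(1, len(path_positions)):
--         prev_x, prev_y = path_positions[i - 1]
--         curr_x, curr_y = path_positions[i]
--         path_length += abs(curr_x - prev_x) + abs(curr_y - prev_y)
--
--     return path_length, path
-- ===== SOURCE B (Python) =====
-- def calculate_path_length(actions):
--     move_delta = {
--         'move_up': (0, 1),
--         'move_down': (0, -1),
--         'move_left': (-1, 0),
--         'move_right': (1, 0)
--     }
--     path = [{"x": d[0], "y": d[1]} for d in (move_delta.get(a) for a in actions) if d is not None]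
--     return len(path), path
-- ===== Notes on version B (the rewrite author's own statement) =====
-- stated objective: simpler
-- what changed: One comprehension appends the delta dict for each recognised action and the count is len(path); A's position list and the second distance-summing loop disappear (every delta is a unit vector, so the distance sum equals the move count).
import Mathlib
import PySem

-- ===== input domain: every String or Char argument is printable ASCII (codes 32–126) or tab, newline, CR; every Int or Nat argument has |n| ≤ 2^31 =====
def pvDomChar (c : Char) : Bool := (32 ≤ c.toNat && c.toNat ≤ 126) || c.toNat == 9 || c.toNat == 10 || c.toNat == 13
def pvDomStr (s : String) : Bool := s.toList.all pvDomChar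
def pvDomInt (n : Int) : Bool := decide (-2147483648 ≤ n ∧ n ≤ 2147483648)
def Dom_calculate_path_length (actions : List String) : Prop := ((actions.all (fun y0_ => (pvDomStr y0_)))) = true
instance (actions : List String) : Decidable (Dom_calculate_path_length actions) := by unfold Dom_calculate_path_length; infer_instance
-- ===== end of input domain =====

-- B replaces A's build-positions-then-sum-distances two-pass structure with a single
-- comprehension over actions and a closed-form count (objective: simpler).

-- ===== PORT A =====

-- the move_delta dict of A (insertion order)
def pvMoveDelta : PySem.Dict String (Int × Int) :=
  PySem.Dict.mk [("move_up", (0, 1)), ("move_down", (0, -1)), ("move_left", (-1, 0)), ("move_right", (1, 0))]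

-- the 'for action in actions' loop of A: state (x, y, path_positions, path)
def pvLoopA : List String → Int → Int → List (Int × Int) → List (List (String × Int)) →
    (List (Int × Int)) × (List (List (String × Int)))
  | [], _, _, pos, path => (pos, path)
  | a :: rest, x, y, pos, path =>
    match PySem.Dict.get? pvMoveDelta a with
    | some (dx, dy) =>
        pvLoopA rest (x + dx) (y + dy) (pos ++ [(x + dx, y + dy)]) (path ++ [[("x", dx), ("y", dy)]])
    | none => pvLoopA rest x y pos path

-- A's second loop: sum of |dx|+|dy| over consecutive positions (indices 1..len-1),
-- written as structural recursion over the same consecutive pairs in the same order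
def pvSumDist : List (Int × Int) → Int
  | p :: q :: rest => ((q.1 - p.1).natAbs + (q.2 - p.2).natAbs : Int) + pvSumDist (q :: rest)
  | _ => 0

def calculate_path_length (actions : List String) : Int × (List (List (String × Int))) :=
  let r := pvLoopA actions 0 0 [(0, 0)] []
  (pvSumDist r.1, r.2)

-- ===== PORT B =====

def pvMoveDeltaB : PySem.Dict String (Int × Int) :=
  PySem.Dict.mk [("move_up", (0, 1)), ("move_down", (0, -1)), ("move_left", (-1, 0)), ("move_right", (1, 0))]

def calculate_path_length_alt (actions : List String) : Int × (List (List (String × Int))) :=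
  let path := actions.filterMap
    (fun a => (PySem.Dict.get? pvMoveDeltaB a).map (fun d => [("x", d.1), ("y", d.2)]))
  ((path.length : Int), path)

-- ===== PRECONDITION & SPEC =====
def Spec_calculate_path_length (actions : List String) (out : Int × (List (List (String × Int)))) : Prop := out = calculate_path_length_alt actions
instance (actions : List String) (out : Int × (List (List (String × Int)))) : Decidable (Spec_calculate_path_length actions out) := by unfold Spec_calculate_path_length; infer_instance

-- ===== CLAIM (what is proved, stated in full; the proofs are below) =====
def Claim_equal_calculate_path_length : Prop := ∀ (actions : List String), Dom_calculate_path_length actions → Spec_calculate_path_length actions (calculate_path_length actions)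

-- ===== LEMMAS AND PROOFS =====

-- B's path, as a function (the filterMap in calculate_path_length_alt)
def pvBPath (actions : List String) : List (List (String × Int)) :=
  actions.filterMap
    (fun a => (PySem.Dict.get? pvMoveDeltaB a).map (fun d => [("x", d.1), ("y", d.2)]))

-- the trail of positions A's loop appends, starting after (x, y)
def pvTrail : List String → Int → Int → List (Int × Int)
  | [], _, _ => []
  | a :: rest, x, y =>
    match PySem.Dict.get? pvMoveDelta a with
    | some (dx, dy) => (x + dx, y + dy) :: pvTrail rest (x + dx) (y + dy)
    | none => pvTrail rest x y

lemma pvLoopA_snd : ∀ (rest : List String) (x y : Int) pos path,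
    (pvLoopA rest x y pos path).2 = path ++ pvBPath rest := by
  intro rest
  induction rest with
  | nil => intro x y pos path; simp [pvLoopA, pvBPath]
  | cons a r ih =>
    intro x y pos path
    simp only [pvLoopA, pvBPath, List.filterMap_cons]
    have : PySem.Dict.get? pvMoveDeltaB a = PySem.Dict.get? pvMoveDelta a := rfl
    rw [this]
    cases h : PySem.Dict.get? pvMoveDelta a with
    | none => simpa [pvBPath] using ih x y pos path
    | some d =>
      obtain ⟨dx, dy⟩ := d
      simp only [Option.map_some]
      rw [ih]
      simp [pvBPath]

lemma pvLoopA_fst : ∀ (rest : List String) (x y : Int) pos path,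
    (pvLoopA rest x y pos path).1 = pos ++ pvTrail rest x y := by
  intro rest
  induction rest with
  | nil => intro x y pos path; simp [pvLoopA, pvTrail]
  | cons a r ih =>
    intro x y pos path
    simp only [pvLoopA, pvTrail]
    cases h : PySem.Dict.get? pvMoveDelta a with
    | none => exact ih x y pos path
    | some d =>
      obtain ⟨dx, dy⟩ := d
      rw [ih]
      simp

lemma pvSumDist_trail : ∀ (rest : List String) (x y : Int),
    pvSumDist ((x, y) :: pvTrail rest x y) = ((pvBPath rest).length : Int) := by
  intro rest
  induction rest with
  | nil => intro x y; simp [pvTrail, pvSumDist, pvBPath]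
  | cons a r ih =>
    intro x y
    simp only [pvTrail, pvBPath, List.filterMap_cons]
    have hBA : PySem.Dict.get? pvMoveDeltaB a = PySem.Dict.get? pvMoveDelta a := rfl
    rw [hBA]
    cases h : PySem.Dict.get? pvMoveDelta a with
    | none => simpa [pvBPath] using ih x y
    | some d =>
      obtain ⟨dx, dy⟩ := d
      have hunit : ((dx.natAbs : Int) + (dy.natAbs : Int)) = 1 := by
        simp only [pvMoveDelta, PySem.Dict.get?_mk_cons] at h
        split_ifs at h <;>
          simp only [PySem.Dict.get?, List.find?_nil, Option.map_none, reduceCtorEq,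
            Option.some.injEq, Prod.mk.injEq] at h <;> omega
      simp only [pvSumDist, Option.map_some, List.length_cons]
      have hrec := ih (x + dx) (y + dy)
      simp only [pvBPath] at hrec
      have h1 : (x + dx - x) = dx := by ring
      have h2 : (y + dy - y) = dy := by ring
      rw [h1, h2, hrec]
      omega

-- ===== VERDICT (by name: the statement is the Claim_ definition above) =====
theorem calculate_path_length_spec : Claim_equal_calculate_path_length := by
  intro actions _
  unfold Spec_calculate_path_length calculate_path_length calculate_path_length_alt
  have h1 := pvLoopA_snd actions 0 0 [(0, 0)] []
  have h2 := pvLoopA_fst actions 0 0 [(0, 0)] []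
  simp only [List.nil_append] at h1
  simp only at h2
  refine Prod.ext ?_ ?_
  · show pvSumDist (pvLoopA actions 0 0 [(0, 0)] []).1 = _
    rw [h2]
    simpa [pvBPath] using pvSumDist_trail actions 0 0
  · simpa [pvBPath] using h1
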